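-- pv_equiv track=rewrite | github.com/cmll2/PragueErasmus | EA/Assignement1/logs.py | fitness_alternative
-- ===== SOURCE A (Python) =====
-- def fitness_alternative(individual):
--     fitness = 0
--     if individual[0] != individual[1]:
--         fitness += 1
--     for i in range(1, len(individual)-1):
--         if individual[i] != individual[i-1] and individual[i] != individual[i+1]:
--             fitness += 1
--     if individual[-1] != individual[-2]:
--         fitness += 1
--     return fitness
-- ===== SOURCE B (Python) =====
-- def fitness_alternative(individual):
--     # Run-length decomposition: an element differs from both neighbours exactly
--     # when it forms a maximal run of equal consecutive elements of length 1.
--     fitness = 0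
--     run_len = 0
--     run_val = None
--     for x in individual:
--         if run_len > 0 and x == run_val:
--             run_len += 1
--         else:
--             if run_len == 1:
--                 fitness += 1
--             run_val = x
--             run_len = 1
--     if run_len == 1:
--         fitness += 1
--     return fitness
-- ===== Notes on version B (the rewrite author's own statement) =====
-- stated objective: alternative
-- what changed: B replaces A's three separate index-based neighbour comparisons (first element, index loop over the middle, last element) by a single run-length pass that counts maximal runs of equal consecutive elements of length exactly 1.
import Mathlib
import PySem

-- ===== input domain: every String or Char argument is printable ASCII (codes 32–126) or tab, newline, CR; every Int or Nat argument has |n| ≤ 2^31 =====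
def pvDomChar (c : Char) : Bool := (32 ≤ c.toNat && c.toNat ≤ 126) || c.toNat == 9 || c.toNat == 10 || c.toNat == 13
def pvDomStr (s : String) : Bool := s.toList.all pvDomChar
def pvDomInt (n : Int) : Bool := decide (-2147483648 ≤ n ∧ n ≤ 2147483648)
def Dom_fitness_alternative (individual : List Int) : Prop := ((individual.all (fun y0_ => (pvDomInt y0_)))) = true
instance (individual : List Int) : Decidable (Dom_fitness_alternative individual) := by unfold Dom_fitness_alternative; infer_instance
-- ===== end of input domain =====

-- B counts maximal runs of equal consecutive elements of length exactly 1 in one pass,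
-- instead of A's three index-based neighbour comparisons (alternative decomposition, same value).

-- ===== PORT A =====
def fitness_alternative (individual : List Int) : Int :=
  -- fitness = 0; if individual[0] != individual[1]: fitness += 1
  let g : Int → Int := fun i => PySem.List.pyGetD individual i 0
  let fit0 : Int := if g 0 ≠ g 1 then 1 else 0
  -- for i in range(1, len(individual)-1): …
  let fit1 : Int :=
    (PySem.List.pyRange 1 ((individual.length : Int) - 1) 1).foldl
      (fun fit i => if g i ≠ g (i - 1) ∧ g i ≠ g (i + 1) then fit + 1 else fit) fit0
  -- if individual[-1] != individual[-2]: fitness += 1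
  if g (-1) ≠ g (-2) then fit1 + 1 else fit1

-- ===== PORT B =====
-- the loop of Source B, as structural recursion over the state (fitness, run_len, run_val)
def altGo : Int → Nat → Int → List Int → Int
  | fit, rl, _, [] => if rl = 1 then fit + 1 else fit
  | fit, rl, rv, x :: xs =>
      if rl > 0 ∧ x = rv then altGo fit (rl + 1) rv xs
      else altGo (if rl = 1 then fit + 1 else fit) 1 x xs

def fitness_alternative_alt (individual : List Int) : Int :=
  altGo 0 0 0 individual

-- ===== PRECONDITION & SPEC =====
-- A indexes positions 0, 1, -1 and -2 of the list: it raises IndexError exactly when len < 2.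
def Pre_fitness_alternative (individual : List Int) : Prop := 2 ≤ individual.length
instance (individual : List Int) : Decidable (Pre_fitness_alternative individual) := by
  unfold Pre_fitness_alternative; infer_instance
def pvWitness_fitness_alternative : List Int := [0, 1]

def Spec_fitness_alternative (individual : List Int) (out : Int) : Prop :=
  out = fitness_alternative_alt individual
instance (individual : List Int) (out : Int) : Decidable (Spec_fitness_alternative individual out) := by
  unfold Spec_fitness_alternative; infer_instance

-- ===== CLAIM (what is proved, stated in full; the proofs are below) =====
def Claim_equal_fitness_alternative : Prop :=
  ∀ (individual : List Int), Dom_fitness_alternative individual →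
    Pre_fitness_alternative individual →
    Spec_fitness_alternative individual (fitness_alternative individual)

-- ===== LEMMAS AND PROOFS =====

-- Shared structural characterisation: H p (c :: xs) = contributions of the elements of
-- c :: xs, each compared with its predecessor (p for c) and, except for the last, its successor;
-- the last element contributes iff it differs from its predecessor.
def H (p : Int) : List Int → Int
  | [] => 0
  | [c] => if c ≠ p then 1 else 0
  | c :: x :: xs => (if c ≠ p ∧ c ≠ x then 1 else 0) + H c (x :: xs)

-- A's middle loop as a Nat-indexed count
def midN (l : List Int) : Nat :=
  (List.range (l.length - 2)).countP
    (fun k => decide (l.getD (k + 1) 0 ≠ l.getD k 0 ∧ l.getD (k + 1) 0 ≠ l.getD (k + 2) 0))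

-- A's last comparison in Nat-index form
def endT (l : List Int) : Int :=
  if l.getD (l.length - 1) 0 ≠ l.getD (l.length - 2) 0 then 1 else 0

lemma midN_cons (a b c : Int) (rest : List Int) :
    midN (a :: b :: c :: rest) = (if b ≠ a ∧ b ≠ c then 1 else 0) + midN (b :: c :: rest) := by
  unfold midN
  have h : (a :: b :: c :: rest).length - 2 = rest.length + 1 := by simp
  have h2 : (b :: c :: rest).length - 2 = rest.length := by simp
  rw [h, h2, List.range_succ_eq_map, List.countP_cons, List.countP_map]
  have hcnt : List.countP
      ((fun k => decide ((a::b::c::rest).getD (k + 1) 0 ≠ (a::b::c::rest).getD k 0 ∧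
          (a::b::c::rest).getD (k + 1) 0 ≠ (a::b::c::rest).getD (k + 2) 0)) ∘ Nat.succ)
      (List.range rest.length)
    = List.countP
      (fun k => decide ((b::c::rest).getD (k + 1) 0 ≠ (b::c::rest).getD k 0 ∧
          (b::c::rest).getD (k + 1) 0 ≠ (b::c::rest).getD (k + 2) 0))
      (List.range rest.length) := by
    apply List.countP_congr
    intro k _
    simp only [Function.comp_apply, Nat.succ_eq_add_one]
    rw [show k + 1 + 1 = (k + 1) + 1 from rfl, show k + 1 + 2 = (k + 2) + 1 from rfl,
        List.getD_cons_succ, List.getD_cons_succ, List.getD_cons_succ]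
    simp
  rw [hcnt]
  by_cases hb : b ≠ a ∧ b ≠ c
  · simp only [List.getD_cons_succ, List.getD_cons_zero]
    simp [hb, Nat.add_comm]
  · simp only [List.getD_cons_succ, List.getD_cons_zero]
    simp [hb]

lemma endT_cons (a b c : Int) (rest : List Int) :
    endT (a :: b :: c :: rest) = endT (b :: c :: rest) := by
  unfold endT
  have h1 : (a :: b :: c :: rest).length - 1 = (rest.length + 1) + 1 := by simp
  have h2 : (a :: b :: c :: rest).length - 2 = rest.length + 1 := by simp
  have h3 : (b :: c :: rest).length - 1 = rest.length + 1 := by simp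
  have h4 : (b :: c :: rest).length - 2 = rest.length := by simp
  rw [h1, h2, h3, h4]
  simp only [List.getD_cons_succ]

lemma combine (rest : List Int) : ∀ (a b : Int),
    (midN (a :: b :: rest) : Int) + endT (a :: b :: rest) = H a (b :: rest) := by
  induction rest with
  | nil =>
      intro a b
      simp [midN, endT, H]
  | cons c rest ih =>
      intro a b
      rw [midN_cons, endT_cons, H]
      push_cast
      rw [add_assoc, ih b c]

lemma altGo_eq (xs : List Int) : ∀ (p c fit : Int) (rl : Nat),
    1 ≤ rl → (rl = 1 ↔ c ≠ p) → altGo fit rl c xs = fit + H p (c :: xs) := by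
  induction xs with
  | nil =>
      intro p c fit rl h1 hiff
      rw [altGo, H]
      by_cases hc : c = p
      · have hrl : rl ≠ 1 := fun h => (hiff.mp h) hc
        simp [hrl, hc]
      · have hrl : rl = 1 := hiff.mpr hc
        simp [hrl, hc]
  | cons x xs ih =>
      intro p c fit rl h1 hiff
      rw [altGo]
      by_cases hx : x = c
      · rw [if_pos ⟨h1, hx⟩]
        rw [ih c c fit (rl + 1) (by omega)
            ⟨fun h => absurd h (by omega), fun h => absurd rfl h⟩]
        subst hx
        rw [H]
        simp
      · rw [if_neg (by simp [hx])]
        rw [ih c x _ 1 le_rfl ⟨fun _ => hx, fun _ => rfl⟩]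
        rw [H]
        by_cases hc : c = p
        · have hrl : rl ≠ 1 := fun h => (hiff.mp h) hc
          simp [hrl, hc]
        · have hrl : rl = 1 := hiff.mpr hc
          have hcx : ¬ c = x := fun h => hx h.symm
          simp [hrl, hc, hcx]
          ring

lemma A_decomp (a b : Int) (rest : List Int) :
    fitness_alternative (a :: b :: rest) =
      (if a ≠ b then 1 else 0) + (midN (a :: b :: rest) : Int) + endT (a :: b :: rest) := by
  unfold fitness_alternative
  set l := a :: b :: rest with hl
  have hlen : l.length = rest.length + 2 := by simp [hl]
  have hg0 : PySem.List.pyGetD l 0 0 = a := by rw [hl]; simp [PySem.List.pyGetD_zero_cons]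
  have hg1 : PySem.List.pyGetD l 1 0 = b := by
    rw [PySem.List.pyGetD_ofNat' l 1 0]; rw [hl]; rfl
  have hgm1 : PySem.List.pyGetD l (-1) 0 = l.getD (l.length - 1) 0 := by
    rw [PySem.List.pyGetD_neg_ofNat l 1 0 (by omega) (by omega)]
    rw [List.getD_eq_getElem _ _ (by omega)]
  have hgm2 : PySem.List.pyGetD l (-2) 0 = l.getD (l.length - 2) 0 := by
    rw [PySem.List.pyGetD_neg_ofNat l 2 0 (by omega) (by omega)]
    rw [List.getD_eq_getElem _ _ (by omega)]
  have hmid : ∀ (fit0 : Int),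
      (PySem.List.pyRange 1 ((l.length : Int) - 1) 1).foldl
        (fun fit i => if PySem.List.pyGetD l i 0 ≠ PySem.List.pyGetD l (i - 1) 0 ∧
                         PySem.List.pyGetD l i 0 ≠ PySem.List.pyGetD l (i + 1) 0
                       then fit + 1 else fit) fit0
      = fit0 + (midN l : Int) := by
    intro fit0
    rw [PySem.List.pyRange_one, List.foldl_map]
    have hn : (((l.length : Int) - 1) - 1).toNat = l.length - 2 := by omega
    rw [hn]
    have hfun : (fun (fit : Int) (k : Nat) =>
        if PySem.List.pyGetD l (1 + (k : Int)) 0 ≠ PySem.List.pyGetD l (1 + (k : Int) - 1) 0 ∧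
           PySem.List.pyGetD l (1 + (k : Int)) 0 ≠ PySem.List.pyGetD l (1 + (k : Int) + 1) 0
        then fit + 1 else fit)
        = (fun (fit : Int) (k : Nat) =>
        if (fun k => decide (l.getD (k + 1) 0 ≠ l.getD k 0 ∧ l.getD (k + 1) 0 ≠ l.getD (k + 2) 0)) k
        then fit + 1 else fit) := by
      funext fit k
      have e2 : (1 + (k : Int) - 1) = ((k : Nat) : Int) := by omega
      have e3 : (1 + (k : Int) + 1) = ((k + 2 : Nat) : Int) := by push_cast; ring
      have e1 : (1 + (k : Int)) = ((k + 1 : Nat) : Int) := by push_cast; ring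
      rw [e2, e3, e1, PySem.List.pyGetD_natCast, PySem.List.pyGetD_natCast,
          PySem.List.pyGetD_natCast]
      simp only [decide_eq_true_eq]
    rw [hfun, PySem.List.foldl_count_if]
    rfl
  simp only [hmid, hg0, hg1, hgm1, hgm2]
  unfold endT
  split_ifs <;> ring

lemma B_decomp (a b : Int) (rest : List Int) :
    fitness_alternative_alt (a :: b :: rest) = H (a - 1) (a :: b :: rest) := by
  unfold fitness_alternative_alt
  rw [altGo, if_neg (by simp)]
  norm_num
  rw [altGo_eq (b :: rest) (a - 1) a 0 1 le_rfl ⟨fun _ => by omega, fun _ => rfl⟩]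
  simp

-- ===== VERDICT (by name: the statement is the Claim_ definition above) =====
theorem fitness_alternative_spec : Claim_equal_fitness_alternative := by
  intro l _ hpre
  unfold Spec_fitness_alternative
  match l, hpre with
  | a :: b :: rest, _ =>
    rw [A_decomp, B_decomp, H, ← combine rest a b]
    have ha : a ≠ a - 1 := by omega
    simp only [ha, ne_eq, not_false_eq_true, true_and]
    split_ifs <;> ring
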